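-- pv_equiv track=rewrite | github.com/IvanGG97/Taller_programacion | actividad2taller.py | numeros_compuestos
-- ===== SOURCE A (Python) =====
-- def numeros_compuestos(vector):
--   numeros_compuestos=[]
--   for numero in vector:
--     contador_divisores=0
--     for i in range(1,numero+1):
--       if numero % i ==0:
--         contador_divisores += 1
--     if contador_divisores > 2:
--       numeros_compuestos.append(numero)
--   return numeros_compuestos
-- ===== SOURCE B (Python) =====
-- def numeros_compuestos(vector):
--     def es_compuesto(n):
--         if n <= 3:
--             return False
--         d = 2
--         while d * d <= n:
--             if n % d == 0:
--                 return True
--             d += 1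
--         return False
--     return [n for n in vector if es_compuesto(n)]
-- ===== Notes on version B (the rewrite author's own statement) =====
-- stated objective: faster
-- what changed: Instead of counting all divisors of each number with a full scan from 1 to n, B tests compositeness by searching for a divisor only up to sqrt(n), stopping at the first hit.
import Mathlib
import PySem

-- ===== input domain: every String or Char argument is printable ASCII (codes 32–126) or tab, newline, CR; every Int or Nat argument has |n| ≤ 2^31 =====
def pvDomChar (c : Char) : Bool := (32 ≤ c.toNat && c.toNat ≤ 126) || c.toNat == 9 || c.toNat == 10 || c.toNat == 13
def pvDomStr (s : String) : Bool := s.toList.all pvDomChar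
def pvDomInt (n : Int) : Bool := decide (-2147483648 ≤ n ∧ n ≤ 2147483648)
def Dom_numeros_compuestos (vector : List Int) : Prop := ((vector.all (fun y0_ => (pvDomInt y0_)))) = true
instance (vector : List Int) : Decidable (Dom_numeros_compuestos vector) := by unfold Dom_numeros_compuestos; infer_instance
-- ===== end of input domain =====

-- B is faster: it tests compositeness with a divisor search up to sqrt(n) instead of counting all divisors from 1 to n.

-- ===== PORT A =====
-- inner loop: contador_divisores over range(1, numero+1)
def pvCountDiv (numero : Int) : Int :=
  (PySem.List.pyRange 1 (numero + 1) 1).foldl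
    (fun c i => if PySem.Int.mod numero i = 0 then c + 1 else c) 0

def numeros_compuestos (vector : List Int) : List Int :=
  vector.foldl (fun acc numero => if 2 < pvCountDiv numero then acc ++ [numero] else acc) []

-- ===== PORT B =====
-- the 'while d*d <= n' loop of Source B, fuel bounds the iteration count (d only reaches sqrt n < n.toNat + 2)
def pvLoop (n : Int) : Nat → Int → Bool
  | 0, _ => false
  | fuel + 1, d =>
      if d * d ≤ n then
        (if PySem.Int.mod n d = 0 then true else pvLoop n fuel (d + 1))
      else false

def pvEsCompuesto (n : Int) : Bool :=
  if n ≤ 3 then false else pvLoop n n.toNat 2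

def numeros_compuestos_alt (vector : List Int) : List Int :=
  vector.filter pvEsCompuesto

-- ===== PRECONDITION & SPEC =====
def Spec_numeros_compuestos (vector : List Int) (out : List Int) : Prop := out = numeros_compuestos_alt vector
instance (vector : List Int) (out : List Int) : Decidable (Spec_numeros_compuestos vector out) := by unfold Spec_numeros_compuestos; infer_instance

-- ===== CLAIM (what is proved, stated in full; the proofs are below) =====
def Claim_equal_numeros_compuestos : Prop := ∀ (vector : List Int), Dom_numeros_compuestos vector → Spec_numeros_compuestos vector (numeros_compuestos vector)

-- ===== LEMMAS AND PROOFS =====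

-- the counting fold is countP
theorem foldl_count (p : Int → Prop) [DecidablePred p] (l : List Int) (c : Int) :
    l.foldl (fun c i => if p i then c + 1 else c) c = c + l.countP (fun i => decide (p i)) := by
  induction l generalizing c with
  | nil => simp
  | cons x xs ih =>
    by_cases h : p x <;> simp [List.countP_cons, h, ih] <;> ring

theorem mod_zero_iff (n d : Int) (hd : 0 < d) : PySem.Int.mod n d = 0 ↔ d ∣ n := by
  rw [PySem.Int.mod_eq_emod_of_pos hd]
  exact ⟨fun h => Int.dvd_of_emod_eq_zero h, fun h => Int.emod_eq_zero_of_dvd h⟩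

-- characterisation of B's while loop
theorem pvLoop_spec (n : Int) : ∀ (fuel : Nat) (d : Int), 2 ≤ d → n < d + fuel →
    (pvLoop n fuel d = true ↔ ∃ e, d ≤ e ∧ e * e ≤ n ∧ PySem.Int.mod n e = 0) := by
  intro fuel
  induction fuel with
  | zero =>
    intro d hd hb
    simp only [pvLoop, Bool.false_eq_true, false_iff]
    rintro ⟨e, he1, he2, -⟩
    have hb' : n < d := by push_cast at hb; omega
    nlinarith [sq_nonneg (e - 1)]
  | succ fuel ih =>
    intro d hd hb
    simp only [pvLoop]
    by_cases h1 : d * d ≤ n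
    · simp only [h1, if_pos]
      by_cases h2 : PySem.Int.mod n d = 0
      · simp only [h2, if_pos, true_iff]
        exact ⟨d, le_refl d, h1, h2⟩
      · simp only [h2, if_neg, not_false_iff]
        rw [ih (d + 1) (by omega) (by push_cast; omega)]
        constructor
        · rintro ⟨e, he1, he2, he3⟩; exact ⟨e, by omega, he2, he3⟩
        · rintro ⟨e, he1, he2, he3⟩
          refine ⟨e, ?_, he2, he3⟩
          rcases eq_or_lt_of_le he1 with h | h
          · exact absurd (h ▸ he3) h2
          · omega
    · simp only [h1, if_neg, not_false_iff, Bool.false_eq_true, false_iff]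
      rintro ⟨e, he1, he2, -⟩
      nlinarith

-- the number-theoretic core: a proper divisor exists iff a divisor ≤ sqrt exists
theorem proper_iff_small (n : Int) (hn : 4 ≤ n) :
    (∃ m, 1 < m ∧ m < n ∧ m ∣ n) ↔ (∃ e, 2 ≤ e ∧ e * e ≤ n ∧ e ∣ n) := by
  constructor
  · rintro ⟨m, hm1, hm2, k, hk⟩
    have hm0 : 0 < m := by omega
    have hk2 : 2 ≤ k := by nlinarith
    by_cases h : m * m ≤ n
    · exact ⟨m, by omega, h, ⟨k, hk⟩⟩
    · refine ⟨k, hk2, ?_, ⟨m, by linarith [hk, mul_comm m k]⟩⟩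
      nlinarith
  · rintro ⟨e, he1, he2, he3⟩
    exact ⟨e, by omega, by nlinarith, he3⟩

-- A's divisor count exceeds 2 iff a proper divisor exists (n ≥ 4)
theorem count_gt_two_iff (n : Int) (hn : 4 ≤ n) :
    (2 < pvCountDiv n) ↔ ∃ m, 1 < m ∧ m < n ∧ m ∣ n := by
  have hcount : pvCountDiv n =
      (((PySem.List.pyRange 1 (n + 1) 1).countP (fun i => decide (PySem.Int.mod n i = 0)) : Nat) : Int) := by
    unfold pvCountDiv
    rw [foldl_count (fun i => PySem.Int.mod n i = 0)]
    ring
  set l := PySem.List.pyRange 1 (n + 1) 1 with hl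
  have hnodup : l.Nodup := by simpa [hl] using PySem.List.nodup_pyRange_one 1 (n+1)
  have hmem : ∀ x, x ∈ l ↔ 1 ≤ x ∧ x < n + 1 := fun x => PySem.List.mem_pyRange_one
  set p : Int → Bool := fun i => decide (PySem.Int.mod n i = 0) with hp
  have hfl : l.countP p = (l.filter p).length := List.countP_eq_length_filter ..
  have hfn : (l.filter p).Nodup := hnodup.filter _
  constructor
  · intro h
    by_contra hno
    push_neg at hno
    -- every element of the filter is 1 or n
    have hsub : (l.filter p).toFinset ⊆ ({1, n} : Finset Int) := by
      intro x hx
      rw [List.mem_toFinset, List.mem_filter] at hx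
      obtain ⟨hxl, hxp⟩ := hx
      rw [hmem] at hxl
      have hx0 : 0 < x := by omega
      have hdvd : x ∣ n := (mod_zero_iff n x hx0).1 (by simpa [hp] using hxp)
      simp only [Finset.mem_insert, Finset.mem_singleton]
      by_contra hne
      push_neg at hne
      exact absurd hdvd (hno x (by omega) (by omega))
    have hcard : (l.filter p).length ≤ 2 := by
      calc (l.filter p).length = (l.filter p).toFinset.card := (List.toFinset_card_of_nodup hfn).symm
        _ ≤ ({1, n} : Finset Int).card := Finset.card_le_card hsub
        _ ≤ 2 := Finset.card_insert_le _ _ |>.trans (by simp)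
    rw [hcount, hfl] at h
    omega
  · rintro ⟨m, hm1, hm2, hm3⟩
    have h1 : (1 : Int) ∈ l.filter p := by
      rw [List.mem_filter, hmem]
      refine ⟨by omega, ?_⟩
      simp [hp, (mod_zero_iff n 1 (by omega)).2 (one_dvd n)]
    have h2 : m ∈ l.filter p := by
      rw [List.mem_filter, hmem]
      refine ⟨by omega, ?_⟩
      simp [hp, (mod_zero_iff n m (by omega)).2 hm3]
    have h3 : n ∈ l.filter p := by
      rw [List.mem_filter, hmem]
      refine ⟨by omega, ?_⟩
      simp [hp, (mod_zero_iff n n (by omega)).2 dvd_rfl]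
    have hsub : ({1, m, n} : Finset Int) ⊆ (l.filter p).toFinset := by
      intro x hx
      simp only [Finset.mem_insert, Finset.mem_singleton] at hx
      rcases hx with rfl | rfl | rfl <;> rw [List.mem_toFinset] <;> assumption
    have hcard3 : ({1, m, n} : Finset Int).card = 3 := by
      rw [Finset.card_insert_of_notMem (by simp; omega), Finset.card_insert_of_notMem (by simp; omega),
        Finset.card_singleton]
    have := Finset.card_le_card hsub
    rw [hcard3, List.toFinset_card_of_nodup hfn] at this
    rw [hcount, hfl]
    omega

-- the pointwise key: A's membership test equals B's
theorem key (n : Int) : (2 < pvCountDiv n) ↔ pvEsCompuesto n = true := by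
  by_cases hn : n ≤ 3
  · rw [pvEsCompuesto, if_pos hn]
    simp only [Bool.false_eq_true, iff_false, not_lt]
    by_cases hn0 : n ≤ 0
    · unfold pvCountDiv
      rw [PySem.List.pyRange_one_eq_nil (by omega)]
      simp
    · interval_cases n <;> decide
  · push_neg at hn
    have hn4 : 4 ≤ n := by omega
    rw [pvEsCompuesto, if_neg (by omega)]
    rw [pvLoop_spec n n.toNat 2 (le_refl 2) (by omega)]
    rw [count_gt_two_iff n hn4, proper_iff_small n hn4]
    constructor
    · rintro ⟨e, he1, he2, he3⟩
      exact ⟨e, he1, he2, (mod_zero_iff n e (by omega)).2 he3⟩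
    · rintro ⟨e, he1, he2, he3⟩
      exact ⟨e, he1, he2, (mod_zero_iff n e (by omega)).1 he3⟩

theorem foldl_filter (l : List Int) (acc : List Int) :
    l.foldl (fun acc numero => if 2 < pvCountDiv numero then acc ++ [numero] else acc) acc
      = acc ++ l.filter pvEsCompuesto := by
  induction l generalizing acc with
  | nil => simp
  | cons x xs ih =>
    simp only [List.foldl_cons, List.filter_cons]
    by_cases h : 2 < pvCountDiv x
    · rw [if_pos h, ih, ((key x).1 h :), List.append_assoc]
      rfl
    · have hx : pvEsCompuesto x = false := by
        cases hpe : pvEsCompuesto x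
        · rfl
        · exact absurd ((key x).2 hpe) h
      rw [if_neg h, ih, hx]
      simp

-- ===== VERDICT (by name: the statement is the Claim_ definition above) =====
theorem numeros_compuestos_spec : Claim_equal_numeros_compuestos := by
  intro vector _
  show numeros_compuestos vector = numeros_compuestos_alt vector
  unfold numeros_compuestos numeros_compuestos_alt
  rw [foldl_filter]
  simp
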